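-- pv_equiv track=rewrite | github.com/CharlesisChuck/TapestriVision | Analyze.py | global_data
-- ===== SOURCE A (Python) =====
-- def global_data(combined_data_all_list: list):
--     global_sizes, global_x, global_y = [], [], []
--
--     for i in range(len(combined_data_all_list)):
--         for j in range(len(combined_data_all_list[i])):
--             global_sizes.append(combined_data_all_list[i][j][1])
--             global_x.append(combined_data_all_list[i][j][2])
--             global_y.append(combined_data_all_list[i][j][3])
--     return [global_sizes, global_x, global_y]
-- ===== SOURCE B (Python) =====
-- def global_data(combined_data_all_list: list):
--     flat = [(t[1], t[2], t[3]) for row in combined_data_all_list for t in row]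
--     if not flat:
--         return [[], [], []]
--     return [list(col) for col in zip(*flat)]
-- ===== Notes on version B (the rewrite author's own statement) =====
-- stated objective: idiomatic
-- what changed: Replaces the index-based double loop with three growing accumulators by a single flatten comprehension over both levels followed by a zip transpose into the three parallel lists.
import Mathlib
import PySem

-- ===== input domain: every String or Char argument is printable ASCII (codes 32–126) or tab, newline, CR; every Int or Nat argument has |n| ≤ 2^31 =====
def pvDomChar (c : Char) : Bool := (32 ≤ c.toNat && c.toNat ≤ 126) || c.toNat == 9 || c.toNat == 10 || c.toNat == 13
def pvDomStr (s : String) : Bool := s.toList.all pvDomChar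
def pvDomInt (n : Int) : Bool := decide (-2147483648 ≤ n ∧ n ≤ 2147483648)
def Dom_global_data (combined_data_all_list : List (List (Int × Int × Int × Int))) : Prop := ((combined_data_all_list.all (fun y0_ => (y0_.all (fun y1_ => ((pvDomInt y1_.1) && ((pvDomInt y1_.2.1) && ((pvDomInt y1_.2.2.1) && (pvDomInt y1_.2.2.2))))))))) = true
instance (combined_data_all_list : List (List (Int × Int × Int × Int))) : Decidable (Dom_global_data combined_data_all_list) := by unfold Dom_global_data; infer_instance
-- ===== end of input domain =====

-- ===== PORT A =====
-- A: index-based double loop appending fields to three accumulator lists.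
def global_data (combined_data_all_list : List (List (Int × Int × Int × Int))) : List (List Int) :=
  let s :=
    combined_data_all_list.foldl
      (fun (acc : List Int × List Int × List Int) row =>
        row.foldl
          (fun (acc : List Int × List Int × List Int) t =>
            (acc.1 ++ [t.2.1], acc.2.1 ++ [t.2.2.1], acc.2.2 ++ [t.2.2.2]))
          acc)
      ([], [], [])
  [s.1, s.2.1, s.2.2]

-- ===== PORT B =====
-- B: flatten both levels into triples, then transpose into three lists (empty case explicit).
def global_data_alt (combined_data_all_list : List (List (Int × Int × Int × Int))) : List (List Int) :=
  let flat := combined_data_all_list.flatMap (fun row => row.map (fun t => (t.2.1, t.2.2.1, t.2.2.2)))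
  match flat with
  | [] => [[], [], []]
  | _ => [flat.map (fun p => p.1), flat.map (fun p => p.2.1), flat.map (fun p => p.2.2)]

-- ===== PRECONDITION & SPEC =====
def Spec_global_data (combined_data_all_list : List (List (Int × Int × Int × Int))) (out : List (List Int)) : Prop := out = global_data_alt combined_data_all_list
instance (combined_data_all_list : List (List (Int × Int × Int × Int))) (out : List (List Int)) : Decidable (Spec_global_data combined_data_all_list out) := by unfold Spec_global_data; infer_instance

-- ===== CLAIM (what is proved, stated in full; the proofs are below) =====
def Claim_equal_global_data : Prop := ∀ (combined_data_all_list : List (List (Int × Int × Int × Int))), Dom_global_data combined_data_all_list → Spec_global_data combined_data_all_list (global_data combined_data_all_list)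

-- ===== LEMMAS AND PROOFS =====

-- ===== VERDICT (by name: the statement is the Claim_ definition above) =====
lemma row_foldl (row : List (Int × Int × Int × Int)) (acc : List Int × List Int × List Int) :
    row.foldl
      (fun (acc : List Int × List Int × List Int) t =>
        (acc.1 ++ [t.2.1], acc.2.1 ++ [t.2.2.1], acc.2.2 ++ [t.2.2.2])) acc
    = (acc.1 ++ row.map (fun t => t.2.1), acc.2.1 ++ row.map (fun t => t.2.2.1),
       acc.2.2 ++ row.map (fun t => t.2.2.2)) := by
  induction row generalizing acc with
  | nil => simp
  | cons t r ih => simp [List.foldl, ih]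

lemma outer_foldl (l : List (List (Int × Int × Int × Int))) (acc : List Int × List Int × List Int) :
    l.foldl
      (fun (acc : List Int × List Int × List Int) row =>
        row.foldl
          (fun (acc : List Int × List Int × List Int) t =>
            (acc.1 ++ [t.2.1], acc.2.1 ++ [t.2.2.1], acc.2.2 ++ [t.2.2.2]))
          acc) acc
    = (acc.1 ++ (l.flatMap (fun row => row.map (fun t => (t.2.1, t.2.2.1, t.2.2.2)))).map (fun p => p.1),
       acc.2.1 ++ (l.flatMap (fun row => row.map (fun t => (t.2.1, t.2.2.1, t.2.2.2)))).map (fun p => p.2.1),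
       acc.2.2 ++ (l.flatMap (fun row => row.map (fun t => (t.2.1, t.2.2.1, t.2.2.2)))).map (fun p => p.2.2)) := by
  induction l generalizing acc with
  | nil => simp
  | cons row rest ih =>
    rw [List.foldl_cons, row_foldl, ih]
    simp

theorem global_data_spec : Claim_equal_global_data := by
  intro l _
  unfold Spec_global_data global_data global_data_alt
  cases h : l.flatMap (fun row => row.map (fun t => (t.2.1, t.2.2.1, t.2.2.2))) with
  | nil => simp [outer_foldl, h]
  | cons a tl => simp [outer_foldl, h]
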